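-- pv_equiv track=rewrite | github.com/tavantai1234/RLN_Ass | play_model2.py | _get_by_numeric_keys
-- ===== SOURCE A (Python) =====
-- def _get_by_numeric_keys(d, n: int):
--     """Try to read d['0'], d['1'], ..., d[str(n-1)]"""
--     out = []
--     for i in range(n):
--         k = str(i)
--         if k not in d:
--             return None
--         out.append(d[k])
--     return out
-- ===== SOURCE B (Python) =====
-- _MISSING = object()
--
-- def _get_by_numeric_keys(d, n: int):
--     """Scatter pass: build a reverse index str(i) -> i, scan the dict's items once,
--     dropping each value into its numeric slot; fail if any slot stays empty.
--     If n exceeds the dict size the slots can never all fill, so fail at once."""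
--     if n > len(d):
--         return None
--     index = {str(i): i for i in range(n)}
--     slots = [_MISSING] * n
--     for k, v in d.items():
--         i = index.get(k)
--         if i is not None:
--             slots[i] = v
--     if _MISSING in slots:
--         return None
--     return slots
-- ===== Notes on version B (the rewrite author's own statement) =====
-- stated objective: alternative
-- what changed: Instead of probing the dict once per index over range(n), B bails out when n exceeds the dict size, then builds a reverse index {str(i): i} and fills an n-slot array in a single scatter pass over the dict's items, returning None if any slot stays empty.
import Mathlib
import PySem

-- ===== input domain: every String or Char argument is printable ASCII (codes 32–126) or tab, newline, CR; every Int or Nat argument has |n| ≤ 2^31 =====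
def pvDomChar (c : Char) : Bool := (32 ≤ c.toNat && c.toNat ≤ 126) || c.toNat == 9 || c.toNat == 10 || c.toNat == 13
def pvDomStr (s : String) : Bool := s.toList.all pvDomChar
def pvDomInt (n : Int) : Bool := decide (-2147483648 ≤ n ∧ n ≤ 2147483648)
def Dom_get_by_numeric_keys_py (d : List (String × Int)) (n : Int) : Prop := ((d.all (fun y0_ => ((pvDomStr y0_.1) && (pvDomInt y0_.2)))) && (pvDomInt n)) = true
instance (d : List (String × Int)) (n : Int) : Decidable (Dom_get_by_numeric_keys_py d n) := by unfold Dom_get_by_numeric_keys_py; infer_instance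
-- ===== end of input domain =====

-- B replaces A's per-index dict probing over range(n) by a reverse index {str(i): i} and a
-- single scatter pass over the dict's items filling numeric slots; same return value (alternative decomposition).

-- ===== PORT A =====
-- A: one loop over range(n), bailing out with None at the first missing key str(i),
-- appending d[str(i)] otherwise. Ported as recursion on the remaining count.
def pvLoopA (d : PySem.Dict String Int) : Nat → Int → List Int → Option (List Int)
  | 0, _, out => some out
  | fuel + 1, i, out =>
    let k := PySem.Int.toStr i
    if (d.contains k) = false then none
    else pvLoopA d fuel (i + 1) (out ++ [d.getD k 0])

def get_by_numeric_keys_py (d : List (String × Int)) (n : Int) : Option (List Int) :=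
  pvLoopA (PySem.Dict.ofList d) n.toNat 0 []

-- ===== PORT B =====
-- B: index = {str(i): i for i in range(n)}
def pvIndexB (n : Int) : PySem.Dict String Int :=
  (PySem.List.pyRange 0 n 1).foldl (fun d i => d.insert (PySem.Int.toStr i) i) PySem.Dict.empty

-- B: the scatter loop 'for k, v in d.items(): i = index.get(k); if i is not None: slots[i] = v'
def pvScatterB (index : PySem.Dict String Int) (slots : List (Option Int)) (items : List (String × Int)) : List (Option Int) :=
  items.foldl (fun slots kv =>
    match index.get? kv.1 with
    | some i => slots.set i.toNat (some kv.2)   -- slots[i] = v; index values are exactly 0..n-1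
    | none => slots) slots

-- slots holds Option Int: none is the _MISSING sentinel
def get_by_numeric_keys_py_alt (d : List (String × Int)) (n : Int) : Option (List Int) :=
  if n > ((PySem.Dict.ofList d).size : Int) then none   -- slots can never all fill
  else
    let index := pvIndexB n
    let slots := pvScatterB index (List.replicate n.toNat none) (PySem.Dict.ofList d).items
    if slots.contains none then none
    else some (slots.map (fun o => o.getD 0))    -- unwrap the Option sentinel encoding

-- ===== PRECONDITION & SPEC =====
def Spec_get_by_numeric_keys_py (d : List (String × Int)) (n : Int) (out : Option (List Int)) : Prop := out = get_by_numeric_keys_py_alt d n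
instance (d : List (String × Int)) (n : Int) (out : Option (List Int)) : Decidable (Spec_get_by_numeric_keys_py d n out) := by unfold Spec_get_by_numeric_keys_py; infer_instance

-- ===== CLAIM (what is proved, stated in full; the proofs are below) =====
def Claim_equal_get_by_numeric_keys_py : Prop := ∀ (d : List (String × Int)) (n : Int), Dom_get_by_numeric_keys_py d n → Spec_get_by_numeric_keys_py d n (get_by_numeric_keys_py d n)

-- ===== LEMMAS AND PROOFS =====

-- decimal digit characters are distinct
theorem pvDigitChar_inj {a b : Nat} (ha : a < 10) (hb : b < 10)
    (h : Nat.digitChar a = Nat.digitChar b) : a = b := by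
  interval_cases a <;> interval_cases b <;> simp_all [Nat.digitChar]

theorem pvToDigits_ne_nil (n : Nat) : Nat.toDigits 10 n ≠ [] := by
  rw [Nat.toDigits_eq_if (by omega)]
  split <;> simp

-- str(n) is injective on naturals (no two distinct indices share a key)
theorem pvToDigits_inj (a : Nat) : ∀ b : Nat, Nat.toDigits 10 a = Nat.toDigits 10 b → a = b := by
  induction a using Nat.strong_induction_on with
  | _ a ih =>
    intro b h
    by_cases h1 : a < 10 <;> by_cases h2 : b < 10
    · rw [Nat.toDigits_of_lt_base h1, Nat.toDigits_of_lt_base h2] at h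
      exact pvDigitChar_inj h1 h2 (by simpa using h)
    · exfalso
      rw [Nat.toDigits_of_lt_base h1, Nat.toDigits_of_base_le (by omega) (by omega)] at h
      have hne := pvToDigits_ne_nil (b / 10)
      have hlen := congrArg List.length h
      simp only [List.length_append, List.length_cons, List.length_nil] at hlen
      exact hne (List.length_eq_zero_iff.mp (by omega))
    · exfalso
      rw [Nat.toDigits_of_lt_base h2, Nat.toDigits_of_base_le (by omega) (by omega)] at h
      have hne := pvToDigits_ne_nil (a / 10)
      have hlen := congrArg List.length h
      simp only [List.length_append, List.length_cons, List.length_nil] at hlen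
      exact hne (List.length_eq_zero_iff.mp (by omega))
    · rw [Nat.toDigits_of_base_le (by omega) (by omega),
        Nat.toDigits_of_base_le (b := 10) (n := b) (by omega) (by omega)] at h
      have hp := List.append_inj' h (by simp)
      have hdiv : a / 10 = b / 10 :=
        ih (a / 10) (Nat.div_lt_self (by omega) (by omega)) (b / 10) hp.1
      have hmod : a % 10 = b % 10 :=
        pvDigitChar_inj (Nat.mod_lt _ (by omega)) (Nat.mod_lt _ (by omega)) (by simpa using hp.2)
      omega

theorem pvToStr_natCast_inj {a b : Nat} (h : PySem.Int.toStr (a : Int) = PySem.Int.toStr (b : Int)) : a = b := by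
  have hc := congrArg String.toList h
  rw [PySem.Int.toList_toStr, PySem.Int.toList_toStr] at hc
  simp only [PySem.Int.toChars] at hc
  rw [if_neg (by omega), if_neg (by omega)] at hc
  simp only [Int.toNat_natCast] at hc
  exact pvToDigits_inj a b hc

theorem pvIndexB_succ (m : Nat) : pvIndexB ((m : Int) + 1)
    = (pvIndexB (m : Int)).insert (PySem.Int.toStr (m : Int)) (m : Int) := by
  unfold pvIndexB
  rw [PySem.List.pyRange_one_succ_right (by positivity), List.foldl_append]
  simp

theorem pvIndexB_toNat (n : Int) : pvIndexB n = pvIndexB ((n.toNat : Nat) : Int) := by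
  rcases le_or_gt 0 n with h | h
  · rw [Int.toNat_of_nonneg h]
  · unfold pvIndexB
    rw [PySem.List.pyRange_one_eq_nil (by omega), PySem.List.pyRange_one_eq_nil (by omega)]

theorem pvIndexB_get?_lt (m i : Nat) (h : i < m) :
    (pvIndexB (m : Int)).get? (PySem.Int.toStr (i : Int)) = some (i : Int) := by
  induction m with
  | zero => omega
  | succ m ih =>
    have hc : ((m + 1 : Nat) : Int) = (m : Int) + 1 := by push_cast; ring
    rw [hc, pvIndexB_succ, PySem.Dict.get?_insert]
    by_cases hi : i = m
    · simp [hi]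
    · have hne : PySem.Int.toStr (i : Int) ≠ PySem.Int.toStr (m : Int) :=
        fun hcon => hi (pvToStr_natCast_inj hcon)
      rw [if_neg hne]
      exact ih (by omega)

theorem pvIndexB_get?_some (m : Nat) (k : String) (j : Int)
    (h : (pvIndexB (m : Int)).get? k = some j) :
    ∃ i : Nat, i < m ∧ j = (i : Int) ∧ k = PySem.Int.toStr (i : Int) := by
  induction m with
  | zero =>
    exfalso
    simp [pvIndexB, PySem.List.pyRange_one_eq_nil, PySem.Dict.get?_empty] at h
  | succ m ih =>
    have hc : ((m + 1 : Nat) : Int) = (m : Int) + 1 := by push_cast; ring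
    rw [hc, pvIndexB_succ, PySem.Dict.get?_insert] at h
    by_cases hk : k = PySem.Int.toStr (m : Int)
    · refine ⟨m, by omega, ?_, hk⟩
      simp [hk] at h
      omega
    · rw [if_neg hk] at h
      obtain ⟨i, hi, hj, hks⟩ := ih h
      exact ⟨i, by omega, hj, hks⟩

theorem pvScatterB_length (idx : PySem.Dict String Int) (items : List (String × Int)) :
    ∀ slots : List (Option Int), (pvScatterB idx slots items).length = slots.length := by
  induction items with
  | nil => intro slots; rfl
  | cons kv rest ih =>
    intro slots
    show (pvScatterB idx (match idx.get? kv.1 with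
      | some j => slots.set j.toNat (some kv.2)
      | none => slots) rest).length = slots.length
    rw [ih]
    cases idx.get? kv.1 <;> simp

theorem pvScatterB_getElem? (n' : Nat) (items : List (String × Int))
    (hnd : (items.map Prod.fst).Nodup) :
    ∀ (slots : List (Option Int)), slots.length = n' → ∀ (i : Nat), i < n' →
    (pvScatterB (pvIndexB (n' : Int)) slots items)[i]? =
      match (items.find? (fun p => p.1 == PySem.Int.toStr (i : Int))).map Prod.snd with
      | some v => some (some v)
      | none => slots[i]? := by
  induction items with
  | nil => intro slots _ i _; simp [pvScatterB]
  | cons kv rest ih =>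
    rw [List.map_cons, List.nodup_cons] at hnd
    obtain ⟨hknotin, hndr⟩ := hnd
    intro slots hl i hi
    have hstep : pvScatterB (pvIndexB (n' : Int)) slots (kv :: rest)
        = pvScatterB (pvIndexB (n' : Int))
            (match (pvIndexB (n' : Int)).get? kv.1 with
             | some j => slots.set j.toNat (some kv.2)
             | none => slots) rest := rfl
    rw [hstep]
    by_cases hk : kv.1 = PySem.Int.toStr (i : Int)
    · -- head key is exactly this slot's key
      have hget : (pvIndexB (n' : Int)).get? kv.1 = some (i : Int) := by
        rw [hk]; exact pvIndexB_get?_lt n' i hi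
      have hrest : rest.find? (fun p => p.1 == PySem.Int.toStr (i : Int)) = none := by
        rw [List.find?_eq_none]
        intro p hp
        simp only [beq_iff_eq]
        intro hcon
        have hm : p.1 ∈ rest.map Prod.fst := List.mem_map_of_mem hp
        rw [hcon, ← hk] at hm
        exact hknotin hm
      rw [ih hndr _ (by simp [hget, hl]) i hi, hrest]
      rw [List.find?_cons_of_pos (by simp [hk]), hget]
      simp only [Int.toNat_natCast, Option.map_some]
      rw [List.getElem?_set_self (by omega)]
      rfl
    · -- head key belongs to a different slot (or to none)
      have hfind : (kv :: rest).find? (fun p => p.1 == PySem.Int.toStr (i : Int))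
          = rest.find? (fun p => p.1 == PySem.Int.toStr (i : Int)) := by
        rw [List.find?_cons_of_neg]
        simp [hk]
      have hslot : (match (pvIndexB (n' : Int)).get? kv.1 with
             | some j => slots.set j.toNat (some kv.2)
             | none => slots)[i]? = slots[i]? := by
        cases hg : (pvIndexB (n' : Int)).get? kv.1 with
        | none => rfl
        | some j =>
          obtain ⟨i0, hi0, hj, hks⟩ := pvIndexB_get?_some n' kv.1 j hg
          have hne : j.toNat ≠ i := by
            intro hcon
            apply hk
            rw [hks]
            congr 1
            omega
          simp [List.getElem?_set_ne hne]
      rw [ih hndr _ (by cases (pvIndexB (n' : Int)).get? kv.1 <;> simp [hl]) i hi, hfind]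
      cases (rest.find? (fun p => p.1 == PySem.Int.toStr (i : Int))).map Prod.snd <;> simp [hslot]

-- the filled slot array IS the per-index lookup table
theorem pvSlots_eq (n' : Nat) (dd : PySem.Dict String Int)
    (hnd : (dd.items.map Prod.fst).Nodup) :
    pvScatterB (pvIndexB (n' : Int)) (List.replicate n' none) dd.items
      = (List.range n').map (fun (i : Nat) => dd.get? (PySem.Int.toStr (i : Int))) := by
  apply List.ext_getElem?
  intro i
  by_cases hi : i < n'
  · rw [pvScatterB_getElem? n' dd.items hnd _ (by simp) i hi]
    have hget : dd.get? (PySem.Int.toStr (i : Int))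
        = (dd.items.find? (fun p => p.1 == PySem.Int.toStr (i : Int))).map Prod.snd := rfl
    rw [List.getElem?_map, List.getElem?_range hi]
    cases hf : (dd.items.find? (fun p => p.1 == PySem.Int.toStr (i : Int))).map Prod.snd <;>
      simp [hget, hf, hi]
  · have h1 : (pvScatterB (pvIndexB (n' : Int)) (List.replicate n' none) dd.items).length = n' := by
      rw [pvScatterB_length]; simp
    have h2 : ((List.range n').map (fun (i : Nat) => dd.get? (PySem.Int.toStr (i : Int)))).length = n' := by
      simp
    rw [List.getElem?_eq_none (by omega), List.getElem?_eq_none (by omega)]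

-- A's loop in closed form
theorem pvLoopA_eq (d : PySem.Dict String Int) (fuel : Nat) :
    ∀ (i : Int) (acc : List Int), pvLoopA d fuel i acc =
      if ∀ k < fuel, (d.get? (PySem.Int.toStr (i + (k : Int)))).isSome = true then
        some (acc ++ (List.range fuel).map (fun (k : Nat) => d.getD (PySem.Int.toStr (i + (k : Int))) 0))
      else none := by
  induction fuel with
  | zero => intro i acc; simp [pvLoopA]
  | succ f ih =>
    intro i acc
    simp only [pvLoopA]
    rw [PySem.Dict.contains_eq_isSome_get?]
    by_cases h : (d.get? (PySem.Int.toStr i)).isSome = true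
    · have hf : (fun (k : Nat) => d.getD (PySem.Int.toStr (i + (k : Int))) 0) ∘ Nat.succ
          = fun (k : Nat) => d.getD (PySem.Int.toStr ((i + 1) + (k : Int))) 0 := by
        funext k; simp only [Function.comp]; congr 2; push_cast; ring
      have hr : (List.range (f + 1)).map (fun (k : Nat) => d.getD (PySem.Int.toStr (i + (k : Int))) 0)
          = d.getD (PySem.Int.toStr i) 0
            :: (List.range f).map (fun (k : Nat) => d.getD (PySem.Int.toStr ((i + 1) + (k : Int))) 0) := by
        rw [List.range_succ_eq_map, List.map_cons, List.map_map, hf]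
        norm_num
      have hcond : (∀ k < f + 1, (d.get? (PySem.Int.toStr (i + (k : Int)))).isSome = true)
          ↔ (∀ k < f, (d.get? (PySem.Int.toStr ((i + 1) + (k : Int)))).isSome = true) := by
        constructor
        · intro hall k hk
          have := hall (k + 1) (by omega)
          convert this using 3
          push_cast; ring_nf
        · intro hall k hk
          rcases Nat.eq_zero_or_pos k with hk0 | hkpos
          · subst hk0; simpa using h
          · obtain ⟨k', rfl⟩ : ∃ k', k = k' + 1 := ⟨k - 1, by omega⟩
            have := hall k' (by omega)
            convert this using 3
            push_cast
            ring_nf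
      rw [if_neg (by simp [h]), ih]
      by_cases h2 : ∀ k < f, (d.get? (PySem.Int.toStr ((i + 1) + (k : Int)))).isSome = true
      · rw [if_pos h2, if_pos (hcond.mpr h2), hr]
        simp
      · rw [if_neg h2, if_neg (fun hc => h2 (hcond.mp hc))]
    · have hno : ¬ ∀ k < f + 1, (d.get? (PySem.Int.toStr (i + (k : Int)))).isSome = true := by
        intro hall
        exact h (by simpa using hall 0 (by omega))
      rw [if_pos (by simpa using h), if_neg hno]

-- ===== VERDICT (by name: the statement is the Claim_ definition above) =====
theorem get_by_numeric_keys_py_spec : Claim_equal_get_by_numeric_keys_py := by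
  intro d n _
  unfold Spec_get_by_numeric_keys_py get_by_numeric_keys_py get_by_numeric_keys_py_alt
  have hnd : ((PySem.Dict.ofList d).items.map Prod.fst).Nodup := by
    have := PySem.Dict.nodup_keys_ofList d
    simpa [PySem.Dict.keys] using this
  show pvLoopA (PySem.Dict.ofList d) n.toNat 0 []
      = if n > ((PySem.Dict.ofList d).size : Int) then none
        else if (pvScatterB (pvIndexB n) (List.replicate n.toNat none) (PySem.Dict.ofList d).items).contains none
        then none
        else some ((pvScatterB (pvIndexB n) (List.replicate n.toNat none) (PySem.Dict.ofList d).items).map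
          (fun o => o.getD 0))
  rw [pvLoopA_eq, pvIndexB_toNat, pvSlots_eq n.toNat (PySem.Dict.ofList d) hnd]
  simp only [zero_add]
  set dd := PySem.Dict.ofList d with hdd
  by_cases hall : ∀ k < n.toNat, (dd.get? (PySem.Int.toStr (k : Int))).isSome = true
  · -- every key is present: the guard cannot fire (pigeonhole: n distinct keys fit in dd)
    have hinj : Function.Injective (fun (i : Nat) => PySem.Int.toStr (i : Int)) :=
      fun a b hab => pvToStr_natCast_inj hab
    have hsub : ((List.range n.toNat).map (fun (i : Nat) => PySem.Int.toStr (i : Int))) ⊆ dd.keys := by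
      intro x hx
      obtain ⟨i, hi, rfl⟩ := List.mem_map.mp hx
      have hc := hall i (List.mem_range.mp hi)
      rw [← PySem.Dict.contains_eq_isSome_get?] at hc
      exact (PySem.Dict.contains_iff_mem_keys _ _).mp hc
    have hlen := (List.subperm_of_subset (List.nodup_range.map hinj) hsub).length_le
    simp only [List.length_map, List.length_range, PySem.Dict.keys] at hlen
    have hguard : ¬ n > (dd.size : Int) := by
      simp only [PySem.Dict.size]
      omega
    have hnone : ((List.range n.toNat).map (fun (i : Nat) => dd.get? (PySem.Int.toStr (i : Int)))).contains none = false := by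
      rw [List.contains_eq_mem]
      simp only [decide_eq_false_iff_not]
      intro hmem
      obtain ⟨i, hi, hget⟩ := List.mem_map.mp hmem
      have := hall i (List.mem_range.mp hi)
      rw [hget] at this
      simp at this
    rw [if_pos hall, if_neg hguard, if_neg (by simp only [hnone]; exact Bool.false_ne_true)]
    congr 1
    simp only [List.nil_append, List.map_map]
    apply List.map_congr_left
    intro k _
    simp only [Function.comp]
    rw [PySem.Dict.getD_eq_get?_getD]
  · -- some key is missing: A yields none, and so does B through either branch
    rw [if_neg hall]
    by_cases hguard : n > (dd.size : Int)
    · rw [if_pos hguard]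
    · have hnone : ((List.range n.toNat).map (fun (i : Nat) => dd.get? (PySem.Int.toStr (i : Int)))).contains none = true := by
        push Not at hall
        obtain ⟨k, hk, hko⟩ := hall
        rw [List.contains_eq_mem]
        simp only [decide_eq_true_eq]
        refine List.mem_map.mpr ⟨k, List.mem_range.mpr hk, ?_⟩
        simpa [Option.isSome_iff_ne_none] using hko
      rw [if_neg hguard, if_pos hnone]
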